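-- pv_equiv track=rewrite | github.com/oist/varroa_parallel | association/gene_haplos.py | which_genes
-- ===== SOURCE A (Python) =====
-- def which_genes(genes, gene_i, pos):
-- 	all_incl = False
-- 	i = gene_i
-- 	res = []
-- 	while ((i < len(genes)) and (not all_incl)):
-- 		if (pos >= genes[i][1]) and (pos <= genes[i][2]):
-- 			res.append(genes[i][0])
-- 			i += 1
-- 		elif (pos > genes[i][2]):
-- 			i += 1
-- 		else:
-- 			all_incl = True
-- 	if (len(res) == 0):
-- 		while ((gene_i < len(genes)) and (pos > genes[gene_i][2])):
-- 			gene_i += 1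
-- 	return (res, gene_i)
-- ===== SOURCE B (Python) =====
-- def which_genes(genes, gene_i, pos):
--     n = len(genes)
--     stop = next((j for j in range(gene_i, n)
--                  if pos < genes[j][1] and pos <= genes[j][2]),
--                 max(gene_i, n))
--     res = [genes[k][0] for k in range(gene_i, stop) if pos <= genes[k][2]]
--     return (res, gene_i if res else stop)
-- ===== Notes on version B (the rewrite author's own statement) =====
-- stated objective: simpler
-- what changed: Replaces A's two mutating while loops (flag-controlled collection loop plus a separate pointer-advance re-scan on empty result) with a declarative pipeline: compute the stop index with next() over a range generator, build the names with one list comprehension over the scanned range, and pick the returned index arithmetically.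
import Mathlib
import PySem

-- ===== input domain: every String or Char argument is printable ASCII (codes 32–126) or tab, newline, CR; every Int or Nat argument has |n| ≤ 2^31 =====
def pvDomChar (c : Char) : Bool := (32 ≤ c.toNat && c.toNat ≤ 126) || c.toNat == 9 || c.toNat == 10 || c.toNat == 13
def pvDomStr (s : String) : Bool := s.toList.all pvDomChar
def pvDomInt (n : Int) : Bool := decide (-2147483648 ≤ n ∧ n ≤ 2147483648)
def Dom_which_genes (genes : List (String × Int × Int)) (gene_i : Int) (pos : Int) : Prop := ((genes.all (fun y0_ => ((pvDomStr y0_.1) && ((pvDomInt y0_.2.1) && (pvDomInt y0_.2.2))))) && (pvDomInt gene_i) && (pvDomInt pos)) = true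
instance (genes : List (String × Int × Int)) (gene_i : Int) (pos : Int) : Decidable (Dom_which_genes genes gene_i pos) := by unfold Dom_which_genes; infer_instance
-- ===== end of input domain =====

-- B replaces A's two stateful while loops by a declarative pipeline: find the stop index
-- (first gene that strictly starts after pos without having ended), then a comprehension
-- over the scanned range (objective: simpler); same return value wherever A returns.

-- ===== PORT A =====
-- A's first while loop: collects gene names, skipping genes that end before pos, until the
-- `else` branch sets all_incl (modelled by the allIncl parameter, re-checked like Python does).
-- pyGet? = none (Python IndexError, excluded by Pre_) stops the loop here.
def whichGenesLoopA (genes : List (String × Int × Int)) (pos : Int) (i : Int) (allIncl : Bool) (res : List String) : List String :=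
  if _h : i < (genes.length : Int) ∧ allIncl = false then
    match PySem.List.pyGet? genes i with
    | none => res
    | some g =>
      if g.2.1 ≤ pos ∧ pos ≤ g.2.2 then
        whichGenesLoopA genes pos (i + 1) false (res ++ [g.1])
      else if g.2.2 < pos then
        whichGenesLoopA genes pos (i + 1) false res
      else
        whichGenesLoopA genes pos i true res
  else res
termination_by ((genes.length - i).toNat, if allIncl then 0 else 1)
decreasing_by all_goals (simp_all; try omega)

-- A's second while loop: advance gene_i past genes whose end is below pos (res empty case).
def whichGenesAdv (genes : List (String × Int × Int)) (pos : Int) (gi : Int) : Int :=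
  if _h : gi < (genes.length : Int) then
    match PySem.List.pyGet? genes gi with
    | none => gi
    | some g => if g.2.2 < pos then whichGenesAdv genes pos (gi + 1) else gi
  else gi
termination_by (genes.length - gi).toNat
decreasing_by all_goals (simp_all; try omega)

def which_genes (genes : List (String × Int × Int)) (gene_i : Int) (pos : Int) : List String × Int :=
  let res := whichGenesLoopA genes pos gene_i false []
  if res.length = 0 then (res, whichGenesAdv genes pos gene_i) else (res, gene_i)

-- ===== PORT B =====
-- Source B's next((j for j in range(g, n) if pos < genes[j][1] and pos <= genes[j][2]), max(g, n)):
-- first j in [g, n) whose gene strictly starts after pos and has not ended, else max g n.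
-- pyGet? = none (Python IndexError, excluded by Pre_) returns j here.
def whichGenesStop (genes : List (String × Int × Int)) (pos : Int) (g : Int) (j : Int) : Int :=
  if _h : j < (genes.length : Int) then
    match PySem.List.pyGet? genes j with
    | none => j
    | some e => if pos < e.2.1 ∧ pos ≤ e.2.2 then j else whichGenesStop genes pos g (j + 1)
  else max g (genes.length : Int)
termination_by (genes.length - j).toNat
decreasing_by all_goals (simp_all; try omega)

-- Source B's comprehension [genes[k][0] for k in range(gene_i, stop) if pos <= genes[k][2]].
def which_genes_alt (genes : List (String × Int × Int)) (gene_i : Int) (pos : Int) : List String × Int :=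
  let stop := whichGenesStop genes pos gene_i gene_i
  let res := (PySem.List.pyRange gene_i stop 1).filterMap (fun k =>
    match PySem.List.pyGet? genes k with
    | some e => if pos ≤ e.2.2 then some e.1 else none
    | none => none)
  if res.isEmpty then (res, stop) else (res, gene_i)

-- ===== PRECONDITION & SPEC =====
-- Pre_ excludes exactly the inputs where Python A raises IndexError: gene_i below
-- -len(genes), where A's loop is entered and genes[gene_i] is out of range (B raises there too).
def Pre_which_genes (genes : List (String × Int × Int)) (gene_i : Int) (pos : Int) : Prop :=
  -(genes.length : Int) ≤ gene_i
instance (genes : List (String × Int × Int)) (gene_i : Int) (pos : Int) : Decidable (Pre_which_genes genes gene_i pos) := by unfold Pre_which_genes; infer_instance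

def pvWitness_which_genes : (List (String × Int × Int)) × Int × Int :=
  ([("a", 1, 3), ("b", 2, 5), ("c", 7, 9)], 0, 2)

def Spec_which_genes (genes : List (String × Int × Int)) (gene_i : Int) (pos : Int) (out : List String × Int) : Prop := out = which_genes_alt genes gene_i pos
instance (genes : List (String × Int × Int)) (gene_i : Int) (pos : Int) (out : List String × Int) : Decidable (Spec_which_genes genes gene_i pos out) := by unfold Spec_which_genes; infer_instance

-- ===== CLAIM (what is proved, stated in full; the proofs are below) =====
def Claim_equal_which_genes : Prop := ∀ (genes : List (String × Int × Int)) (gene_i : Int) (pos : Int), Dom_which_genes genes gene_i pos → Pre_which_genes genes gene_i pos → Spec_which_genes genes gene_i pos (which_genes genes gene_i pos)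

-- ===== LEMMAS AND PROOFS =====

-- the comprehension body, named for the proofs
def wgF (genes : List (String × Int × Int)) (pos : Int) (k : Int) : Option String :=
  match PySem.List.pyGet? genes k with
  | some e => if pos ≤ e.2.2 then some e.1 else none
  | none => none

theorem wgGet_some (genes : List (String × Int × Int)) (j : Int)
    (h1 : -(genes.length : Int) ≤ j) (h2 : j < (genes.length : Int)) :
    ∃ e, PySem.List.pyGet? genes j = some e := by
  cases hg : PySem.List.pyGet? genes j with
  | none =>
    exfalso
    rw [PySem.List.pyGet?_eq_none_iff] at hg
    exact hg ⟨h1, h2⟩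
  | some e => exact ⟨e, rfl⟩

theorem stop_ge (genes : List (String × Int × Int)) (pos : Int) (g : Int) :
    ∀ j, j ≤ (genes.length : Int) → j ≤ whichGenesStop genes pos g j := by
  intro j hj
  rw [whichGenesStop]
  by_cases hlt : j < (genes.length : Int)
  · simp only [dif_pos hlt]
    cases PySem.List.pyGet? genes j with
    | none => exact le_refl j
    | some e =>
      by_cases hc : pos < e.2.1 ∧ pos ≤ e.2.2
      · simp [hc]
      · simp only [if_neg hc]
        have := stop_ge genes pos g (j + 1) (by omega)
        omega
  · simp only [dif_neg hlt]
    omega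
termination_by j => (genes.length - j).toNat
decreasing_by omega

theorem stop_congr (genes : List (String × Int × Int)) (pos : Int) (g g' : Int)
    (hg : g ≤ (genes.length : Int)) (hg' : g' ≤ (genes.length : Int)) :
    ∀ j, whichGenesStop genes pos g j = whichGenesStop genes pos g' j := by
  intro j
  rw [whichGenesStop]
  conv_rhs => rw [whichGenesStop]
  by_cases hlt : j < (genes.length : Int)
  · simp only [dif_pos hlt]
    cases PySem.List.pyGet? genes j with
    | none => rfl
    | some e =>
      by_cases hc : pos < e.2.1 ∧ pos ≤ e.2.2
      · simp [hc]
      · simp only [if_neg hc]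
        exact stop_congr genes pos g g' hg hg' (j + 1)
  · simp only [dif_neg hlt]
    omega
termination_by j => (genes.length - j).toNat
decreasing_by omega

-- A's collection loop equals B's comprehension over the scanned range.
theorem loopA_eq_comp (genes : List (String × Int × Int)) (pos : Int) :
    ∀ j res, -(genes.length : Int) ≤ j →
      whichGenesLoopA genes pos j false res
        = res ++ (PySem.List.pyRange j (whichGenesStop genes pos j j) 1).filterMap (wgF genes pos) := by
  intro j res hpre
  by_cases hlt : j < (genes.length : Int)
  · obtain ⟨e, he⟩ := wgGet_some genes j hpre hlt
    rw [whichGenesLoopA]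
    conv_rhs => rw [whichGenesStop]
    rw [dif_pos (show j < (genes.length : Int) ∧ false = false from ⟨hlt, rfl⟩), dif_pos hlt]
    simp only [he]
    by_cases hstop : pos < e.2.1 ∧ pos ≤ e.2.2
    · have h1 : ¬ (e.2.1 ≤ pos ∧ pos ≤ e.2.2) := by omega
      have h2 : ¬ e.2.2 < pos := by omega
      simp only [if_pos hstop, if_neg h1, if_neg h2]
      rw [whichGenesLoopA]
      simp [PySem.List.pyRange_one_eq_nil (le_refl j)]
    · simp only [if_neg hstop]
      have hcongr : whichGenesStop genes pos j (j + 1) = whichGenesStop genes pos (j + 1) (j + 1) :=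
        stop_congr genes pos j (j + 1) (by omega) (by omega) (j + 1)
      have hge : j + 1 ≤ whichGenesStop genes pos (j + 1) (j + 1) :=
        stop_ge genes pos (j + 1) (j + 1) (by omega)
      have hrange : PySem.List.pyRange j (whichGenesStop genes pos j (j + 1)) 1
          = j :: PySem.List.pyRange (j + 1) (whichGenesStop genes pos j (j + 1)) 1 :=
        PySem.List.pyRange_one_cons (by omega)
      rw [hrange, List.filterMap_cons]
      by_cases hin : e.2.1 ≤ pos ∧ pos ≤ e.2.2
      · have hf : wgF genes pos j = some e.1 := by simp [wgF, he, hin.2]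
        simp only [if_pos hin, hf]
        rw [loopA_eq_comp genes pos (j + 1) (res ++ [e.1]) (by omega), hcongr]
        simp
      · have hout : e.2.2 < pos := by omega
        have hf : wgF genes pos j = none := by
          simp only [wgF, he]
          simp [show ¬ pos ≤ e.2.2 by omega]
        simp only [if_neg hin, if_pos hout, hf]
        rw [loopA_eq_comp genes pos (j + 1) res (by omega), hcongr]
  · rw [whichGenesLoopA, whichGenesStop]
    rw [dif_neg (show ¬ (j < (genes.length : Int) ∧ false = false) from fun h => hlt h.1),
      dif_neg hlt]
    have hmax : max j (genes.length : Int) = j := by omega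
    rw [hmax, PySem.List.pyRange_one_eq_nil (le_refl j)]
    simp
termination_by j => (genes.length - j).toNat
decreasing_by all_goals omega

-- When the comprehension is empty, A's pointer-advance loop reaches exactly B's stop index.
theorem adv_eq_stop (genes : List (String × Int × Int)) (pos : Int) :
    ∀ j, -(genes.length : Int) ≤ j →
      (PySem.List.pyRange j (whichGenesStop genes pos j j) 1).filterMap (wgF genes pos) = [] →
      whichGenesAdv genes pos j = whichGenesStop genes pos j j := by
  intro j hpre hres
  by_cases hlt : j < (genes.length : Int)
  · obtain ⟨e, he⟩ := wgGet_some genes j hpre hlt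
    rw [whichGenesAdv]
    conv_rhs => rw [whichGenesStop]
    rw [whichGenesStop] at hres
    simp only [dif_pos hlt, he] at hres ⊢
    by_cases hstop : pos < e.2.1 ∧ pos ≤ e.2.2
    · have h2 : ¬ e.2.2 < pos := by omega
      simp [if_pos hstop, if_neg h2]
    · simp only [if_neg hstop] at hres ⊢
      have hcongr : whichGenesStop genes pos j (j + 1) = whichGenesStop genes pos (j + 1) (j + 1) :=
        stop_congr genes pos j (j + 1) (by omega) (by omega) (j + 1)
      have hge : j + 1 ≤ whichGenesStop genes pos (j + 1) (j + 1) :=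
        stop_ge genes pos (j + 1) (j + 1) (by omega)
      have hrange : PySem.List.pyRange j (whichGenesStop genes pos j (j + 1)) 1
          = j :: PySem.List.pyRange (j + 1) (whichGenesStop genes pos j (j + 1)) 1 :=
        PySem.List.pyRange_one_cons (by omega)
      rw [hrange, List.filterMap_cons] at hres
      cases hf : wgF genes pos j with
      | some s => simp [hf] at hres
      | none =>
        have hout : e.2.2 < pos := by
          simp only [wgF, he] at hf
          by_contra hc
          simp [show pos ≤ e.2.2 by omega] at hf
        simp only [hf] at hres
        simp only [if_pos hout]
        rw [adv_eq_stop genes pos (j + 1) (by omega) (by rw [← hcongr]; exact hres), ← hcongr]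
  · rw [whichGenesAdv, whichGenesStop]
    have hmax : max j (genes.length : Int) = j := by omega
    simp [dif_neg hlt, hmax]
termination_by j => (genes.length - j).toNat
decreasing_by all_goals omega

-- ===== VERDICT (by name: the statement is the Claim_ definition above) =====
theorem which_genes_spec : Claim_equal_which_genes := by
  intro genes gene_i pos _ hpre
  unfold Spec_which_genes which_genes which_genes_alt
  rw [loopA_eq_comp genes pos gene_i [] hpre]
  simp only [List.nil_append]
  by_cases h : (PySem.List.pyRange gene_i (whichGenesStop genes pos gene_i gene_i) 1).filterMap (wgF genes pos) = []
  · have hadv := adv_eq_stop genes pos gene_i hpre h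
    simp only [wgF] at h ⊢
    simp [h, hadv]
  · simp only [wgF] at h ⊢
    simp [h, List.isEmpty_iff, List.length_eq_zero_iff]
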